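-- pv_equiv track=rewrite | github.com/Manijitya30/HackByte4.0 | backend/metadata.py | score_flags
-- ===== SOURCE A (Python) =====
-- def score_flags(flags):
--     score = 0
--
--     for f in flags:
--         if "Edited using image editing software" in f:
--             score += 3
--         elif "Image modified after capture" in f:
--             score += 3
--         elif "AI generation software detected" in f:
--             score += 4
--         elif "File metadata shows modification after creation" in f:
--             score += 3
--         elif "No camera metadata" in f:
--             score += 2
--         elif "Metadata stripped" in f:
--             score += 2
--         elif "Likely AI-generated" in f:
--             score += 5  # strong signal
--         else:
--             score += 1
--
--     return score
-- ===== SOURCE B (Python) =====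
-- _TABLE = (
--     ("Edited using image editing software", 3),
--     ("Image modified after capture", 3),
--     ("AI generation software detected", 4),
--     ("File metadata shows modification after creation", 3),
--     ("No camera metadata", 2),
--     ("Metadata stripped", 2),
--     ("Likely AI-generated", 5),
-- )
--
-- def score_flags(flags):
--     # Pattern-major sieve: for each pattern (priority order) remove the flags it
--     # matches from the pool and credit weight * count; leftovers score 1 each.
--     score = 0
--     remaining = list(flags)
--     for sub, w in _TABLE:
--         matched = [f for f in remaining if sub in f]
--         remaining = [f for f in remaining if sub not in f]
--         score += w * len(matched)
--     return score + len(remaining)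
-- ===== Notes on version B (the rewrite author's own statement) =====
-- stated objective: alternative
-- what changed: Inverts the loop nesting: instead of scanning the pattern cascade once per flag, B iterates over the patterns, filtering the matching flags out of a shrinking pool and crediting weight*count in bulk, then scores the leftover pool 1 each.
import Mathlib
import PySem

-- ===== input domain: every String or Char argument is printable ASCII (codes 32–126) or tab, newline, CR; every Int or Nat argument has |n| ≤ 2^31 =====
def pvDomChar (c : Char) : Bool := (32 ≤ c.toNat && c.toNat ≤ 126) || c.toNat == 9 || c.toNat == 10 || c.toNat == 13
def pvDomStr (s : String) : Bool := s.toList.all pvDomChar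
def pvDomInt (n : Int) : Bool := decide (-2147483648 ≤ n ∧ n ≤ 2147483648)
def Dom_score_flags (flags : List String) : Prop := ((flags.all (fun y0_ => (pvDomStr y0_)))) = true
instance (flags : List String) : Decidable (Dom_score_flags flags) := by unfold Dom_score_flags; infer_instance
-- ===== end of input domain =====

-- B inverts the loop nesting: a pattern-major sieve filtering a shrinking flag pool and crediting weight*count per pattern; alternative decomposition, same cost.


-- ===== PORT A =====
def score_flags (flags : List String) : Int :=
  flags.foldl (fun score f =>
    if PySem.Str.isIn "Edited using image editing software" f then score + 3
    else if PySem.Str.isIn "Image modified after capture" f then score + 3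
    else if PySem.Str.isIn "AI generation software detected" f then score + 4
    else if PySem.Str.isIn "File metadata shows modification after creation" f then score + 3
    else if PySem.Str.isIn "No camera metadata" f then score + 2
    else if PySem.Str.isIn "Metadata stripped" f then score + 2
    else if PySem.Str.isIn "Likely AI-generated" f then score + 5
    else score + 1) 0

-- ===== PORT B =====
def pvTable : List (String × Int) :=
  [("Edited using image editing software", 3),
   ("Image modified after capture", 3),
   ("AI generation software detected", 4),
   ("File metadata shows modification after creation", 3),
   ("No camera metadata", 2),
   ("Metadata stripped", 2),
   ("Likely AI-generated", 5)]

-- pattern-major sieve: state = (score so far, remaining pool of flags)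
def score_flags_alt (flags : List String) : Int :=
  let st := pvTable.foldl (fun (st : Int × List String) p =>
    let matched := st.2.filter (fun f => PySem.Str.isIn p.1 f)
    let remaining := st.2.filter (fun f => !PySem.Str.isIn p.1 f)
    (st.1 + p.2 * matched.length, remaining)) (0, flags)
  st.1 + st.2.length

-- ===== PRECONDITION & SPEC =====
def Spec_score_flags (flags : List String) (out : Int) : Prop := out = score_flags_alt flags
instance (flags : List String) (out : Int) : Decidable (Spec_score_flags flags out) := by unfold Spec_score_flags; infer_instance

-- ===== CLAIM (what is proved, stated in full; the proofs are below) =====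
def Claim_equal_score_flags : Prop := ∀ (flags : List String), Dom_score_flags flags → Spec_score_flags flags (score_flags flags)

-- ===== LEMMAS AND PROOFS =====

-- weight of the first matching pattern in a table, default 1
def pvFMW (tbl : List (String × Int)) (f : String) : Int :=
  match tbl with
  | [] => 1
  | p :: rest => if PySem.Str.isIn p.1 f then p.2 else pvFMW rest f

theorem pv_sum_split (fs : List String) (m : String → Bool) (w : Int) (g : String → Int) :
    (fs.map (fun f => if m f then w else g f)).sum
      = w * ((fs.filter m).length : Int) + ((fs.filter (fun f => !m f)).map g).sum := by
  induction fs with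
  | nil => simp
  | cons f rest ih =>
    by_cases h : m f = true <;> simp [h, ih] <;> ring

-- the sieve over any table computes the sum of first-match weights over the pool
theorem pv_sieve (tbl : List (String × Int)) (s : Int) (fs : List String) :
    (let st := tbl.foldl (fun (st : Int × List String) p =>
        (st.1 + p.2 * ((st.2.filter (fun f => PySem.Str.isIn p.1 f)).length : Int),
         st.2.filter (fun f => !PySem.Str.isIn p.1 f))) (s, fs)
     st.1 + st.2.length)
      = s + (fs.map (pvFMW tbl)).sum := by
  induction tbl generalizing s fs with
  | nil => simp [pvFMW]
  | cons p rest ih =>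
    simp only [List.foldl_cons]
    rw [ih]
    have := pv_sum_split fs (fun f => PySem.Str.isIn p.1 f) p.2 (pvFMW rest)
    simp only [pvFMW, this]
    ring

theorem pv_foldl_shift (flags : List String) (a : Int) :
    flags.foldl (fun score f =>
      if PySem.Str.isIn "Edited using image editing software" f then score + 3
      else if PySem.Str.isIn "Image modified after capture" f then score + 3
      else if PySem.Str.isIn "AI generation software detected" f then score + 4
      else if PySem.Str.isIn "File metadata shows modification after creation" f then score + 3
      else if PySem.Str.isIn "No camera metadata" f then score + 2
      else if PySem.Str.isIn "Metadata stripped" f then score + 2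
      else if PySem.Str.isIn "Likely AI-generated" f then score + 5
      else score + 1) a
    = a + (flags.map (pvFMW pvTable)).sum := by
  induction flags generalizing a with
  | nil => simp
  | cons f rest ih =>
    simp only [List.foldl_cons, List.map_cons, List.sum_cons, ih, pvFMW, pvTable]
    split_ifs <;> ring

-- ===== VERDICT (by name: the statement is the Claim_ definition above) =====
theorem score_flags_spec : Claim_equal_score_flags := by
  intro flags _
  unfold Spec_score_flags score_flags score_flags_alt
  rw [pv_foldl_shift flags 0, pv_sieve pvTable 0 flags]
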